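-- pv_equiv track=rewrite | github.com/yangyueren/ER_Measures | code/evaluate.py | cal_DB
-- ===== SOURCE A (Python) =====
-- def cal_DB(labels, group):
--     """
--     return the pairs set that are the same driver id
--     :param labels:
--     :param group:
--     :return: set : (traj1, traj2)  traj1 < traj2
--     """
--     ans = set()
--     for i in range(len(group)):
--         for j in range(i):
--             if labels[i] == labels[j]:
--                 assert j < i, 'pair error'
--                 a = group[i]
--                 b = group[j]
--                 m = min(a,b)
--                 n = max(a,b)
--                 assert m < n, 'pair error'
--                 ans.add((m, n))
--     return ans
-- ===== SOURCE B (Python) =====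
-- def cal_DB(labels, group):
--     """
--     return the pairs set that are the same driver id
--     :param labels:
--     :param group:
--     :return: set : (traj1, traj2)  traj1 < traj2
--     """
--     ans = set()
--     buckets = {}
--     for i in range(len(group)):
--         lab = labels[i]
--         a = group[i]
--         for b in buckets.get(lab, []):
--             ans.add((min(a, b), max(a, b)))
--         buckets.setdefault(lab, []).append(a)
--     return ans
-- ===== Notes on version B (the rewrite author's own statement) =====
-- stated objective: faster
-- what changed: Replaced the all-pairs double loop (every j<i compared) by a single pass that buckets earlier group values per label in a dict and pairs each element only with its own label's bucket.
-- outside the precondition, e.g. on cal_DB([], [7]): A returns set(), B raises IndexError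
import Mathlib
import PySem

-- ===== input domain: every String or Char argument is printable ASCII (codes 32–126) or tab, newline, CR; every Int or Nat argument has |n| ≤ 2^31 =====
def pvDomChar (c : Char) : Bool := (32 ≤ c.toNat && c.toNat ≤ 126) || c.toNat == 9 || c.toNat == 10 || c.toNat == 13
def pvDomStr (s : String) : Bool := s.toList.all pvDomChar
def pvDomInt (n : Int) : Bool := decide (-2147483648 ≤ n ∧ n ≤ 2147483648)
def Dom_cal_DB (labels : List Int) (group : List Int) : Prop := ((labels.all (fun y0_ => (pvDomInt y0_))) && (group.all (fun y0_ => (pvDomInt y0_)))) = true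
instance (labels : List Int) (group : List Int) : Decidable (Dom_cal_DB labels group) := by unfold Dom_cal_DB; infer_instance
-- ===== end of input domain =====

-- B replaces A's quadratic all-pairs double loop by a single pass that buckets earlier
-- group values per label in a dict, pairing each element only with its own label's bucket.

-- ===== PORT A =====
def cal_DB (labels : List Int) (group : List Int) : List (Int × Int) :=
  (PySem.List.pyRange 0 (group.length : Int) 1).foldl (fun ans i =>
    (PySem.List.pyRange 0 i 1).foldl (fun ans j =>
      if PySem.List.pyGetD labels i 0 = PySem.List.pyGetD labels j 0 then
        let a := PySem.List.pyGetD group i 0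
        let b := PySem.List.pyGetD group j 0
        let m := min a b
        let n := max a b
        PySem.Set.add ans (m, n)
      else ans) ans) []

-- ===== PORT B =====
def cal_DB_alt (labels : List Int) (group : List Int) : List (Int × Int) :=
  ((PySem.List.pyRange 0 (group.length : Int) 1).foldl
    (fun (st : List (Int × Int) × PySem.Dict Int (List Int)) i =>
      let lab := PySem.List.pyGetD labels i 0
      let a := PySem.List.pyGetD group i 0
      let ans := (st.2.getD lab []).foldl
        (fun ans b => PySem.Set.add ans (min a b, max a b)) st.1
      (ans, st.2.modify lab [] (fun l => l ++ [a])))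
    ([], PySem.Dict.empty)).1

-- ===== PRECONDITION & SPEC =====
-- Pre_ excludes the inputs where A raises — labels shorter than group (IndexError; B raises
-- too) or some earlier index with the same label and the same group value (A's 'assert m < n'
-- fails with AssertionError, while B returns the set including that (v,v) pair) — plus the
-- one corner where shorter labels still lets A return: a single-element group with labels
-- too short, where A's empty inner loop never touches labels but B reads labels[0] and raises.
def Pre_cal_DB (labels : List Int) (group : List Int) : Prop :=
  group.length ≤ labels.length ∧
  ∀ j < group.length, ∀ i < j,
    labels.getD i 0 = labels.getD j 0 → group.getD i 0 ≠ group.getD j 0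
instance (labels : List Int) (group : List Int) : Decidable (Pre_cal_DB labels group) := by
  unfold Pre_cal_DB; infer_instance

def pvWitness_cal_DB : List Int × List Int := ([1, 2, 1, 2], [10, 20, 30, 40])

def Spec_cal_DB (labels : List Int) (group : List Int) (out : List (Int × Int)) : Prop := out = cal_DB_alt labels group
instance (labels : List Int) (group : List Int) (out : List (Int × Int)) : Decidable (Spec_cal_DB labels group out) := by unfold Spec_cal_DB; infer_instance

-- ===== CLAIM (what is proved, stated in full; the proofs are below) =====
def Claim_equal_cal_DB : Prop := ∀ (labels : List Int) (group : List Int), Dom_cal_DB labels group → Pre_cal_DB labels group → Spec_cal_DB labels group (cal_DB labels group)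


-- ===== LEMMAS AND PROOFS =====

-- generic filtered-fold shape: a conditional loop equals a fold over the filtered, mapped list
theorem foldl_filter_map {α β γ : Type} (L : List α) (p : α → Prop) [DecidablePred p]
    (q : α → β) (h : γ → β → γ) (init : γ) :
    L.foldl (fun acc k => if p k then h acc (q k) else acc) init
      = ((L.filter (fun k => decide (p k))).map q).foldl h init := by
  induction L generalizing init with
  | nil => rfl
  | cons x t ih => by_cases hp : p x <;> simp [List.foldl, hp, ih]

-- swap the orientation of the equality inside a filter
theorem filter_comm_eq (labels : List Int) (c : Int) (L : List Nat) :
    L.filter (fun j => decide (c = labels.getD j 0))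
      = L.filter (fun j => decide (labels.getD j 0 = c)) := by
  apply List.filter_congr; intro j _; simp [eq_comm]

-- A's inner loop over j < i equals a fold over the list of earlier same-label group values
theorem innerA_eq (labels group : List Int) (i : Nat) (ans : List (Int × Int)) :
    (PySem.List.pyRange 0 (i : Int) 1).foldl (fun ans j =>
      if PySem.List.pyGetD labels (i : Int) 0 = PySem.List.pyGetD labels j 0 then
        let a := PySem.List.pyGetD group (i : Int) 0
        let b := PySem.List.pyGetD group j 0
        let m := min a b
        let n := max a b
        PySem.Set.add ans (m, n)
      else ans) ans
    = (((List.range i).filter (fun j => decide (labels.getD i 0 = labels.getD j 0))).map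
        (fun j => group.getD j 0)).foldl
        (fun ans b => PySem.Set.add ans (min (group.getD i 0) b, max (group.getD i 0) b)) ans := by
  rw [PySem.List.pyRange_zero_nat, List.foldl_map]
  simp only [PySem.List.pyGetD_natCast]
  exact foldl_filter_map (List.range i) (fun j => labels.getD i 0 = labels.getD j 0)
    (fun j => group.getD j 0)
    (fun ans b => PySem.Set.add ans (min (group.getD i 0) b, max (group.getD i 0) b)) ans

-- main invariant: after processing the first n indices, B's answer equals A's answer and
-- every bucket holds exactly the earlier same-label group values, in index order
theorem main_inv (labels group : List Int) (n : Nat) :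
    (((PySem.List.pyRange 0 (n : Int) 1).foldl
      (fun (st : List (Int × Int) × PySem.Dict Int (List Int)) i =>
        let lab := PySem.List.pyGetD labels i 0
        let a := PySem.List.pyGetD group i 0
        let ans := (st.2.getD lab []).foldl
          (fun ans b => PySem.Set.add ans (min a b, max a b)) st.1
        (ans, st.2.modify lab [] (fun l => l ++ [a])))
      ([], PySem.Dict.empty)).1
      = (PySem.List.pyRange 0 (n : Int) 1).foldl (fun ans i =>
          (PySem.List.pyRange 0 i 1).foldl (fun ans j =>
            if PySem.List.pyGetD labels i 0 = PySem.List.pyGetD labels j 0 then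
              let a := PySem.List.pyGetD group i 0
              let b := PySem.List.pyGetD group j 0
              let m := min a b
              let n := max a b
              PySem.Set.add ans (m, n)
            else ans) ans) [])
    ∧ ∀ lab : Int,
        ((PySem.List.pyRange 0 (n : Int) 1).foldl
          (fun (st : List (Int × Int) × PySem.Dict Int (List Int)) i =>
            let lab := PySem.List.pyGetD labels i 0
            let a := PySem.List.pyGetD group i 0
            let ans := (st.2.getD lab []).foldl
              (fun ans b => PySem.Set.add ans (min a b, max a b)) st.1
            (ans, st.2.modify lab [] (fun l => l ++ [a])))
          ([], PySem.Dict.empty)).2.getD lab []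
        = ((List.range n).filter (fun j => decide (labels.getD j 0 = lab))).map
            (fun j => group.getD j 0) := by
  induction n with
  | zero =>
      constructor
      · rfl
      · intro lab; simp [PySem.Dict.getD_empty]
  | succ n ih =>
      obtain ⟨ih1, ih2⟩ := ih
      have hsplit : PySem.List.pyRange 0 ((n + 1 : Nat) : Int) 1
          = PySem.List.pyRange 0 (n : Int) 1 ++ [(n : Int)] := by
        have h0 : (0 : Int) ≤ (n : Int) := by positivity
        push_cast
        exact PySem.List.pyRange_one_succ_right h0
      rw [hsplit]
      simp only [List.foldl_append, List.foldl_cons, List.foldl_nil]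
      refine ⟨?_, ?_⟩
      · rw [innerA_eq labels group n]
        simp only [PySem.List.pyGetD_natCast, ih1, ih2]
        rw [filter_comm_eq labels (labels.getD n 0) (List.range n)]
      · intro lab
        simp only [PySem.List.pyGetD_natCast]
        rw [PySem.Dict.getD_modify]
        rw [List.range_succ, List.filter_append, List.map_append]
        by_cases h : labels.getD n 0 = lab
        · subst h
          rw [if_pos rfl, ih2]
          simp [List.filter]
        · rw [if_neg (fun hc => h hc.symm), ih2]
          have hd : (decide (labels[n]?.getD 0 = lab)) = false := decide_eq_false h
          simp [List.filter, hd]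

-- ===== VERDICT (by name: the statement is the Claim_ definition above) =====
theorem cal_DB_spec : Claim_equal_cal_DB := by
  intro labels group _ _
  unfold Spec_cal_DB cal_DB cal_DB_alt
  exact (main_inv labels group group.length).1.symm
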